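-- pv_equiv track=rewrite | github.com/miliar/Code_Jam_Webscraper | solutions_python/solutions_year16_round0_nr4/1090.py | check
-- ===== SOURCE A (Python) =====
-- def check(K,C,S):
--     needed = max(K-C+1,1)
--     if S<needed:
--         return 'IMPOSSIBLE'
--     #for C =1
--     pat =0
--     char = 1
--     st = pat + char
--     for i in range(2,C+1):
--         pat = (st-1)*K
--         char += 1
--         if char>K:
--             char = K
--         st = pat + char
--     res = range(st,st + needed)
--     return ' '.join(map(str,res))
-- ===== SOURCE B (Python) =====
-- def check(K, C, S):
--     needed = K - C + 1 if K - C + 1 > 1 else 1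
--     if S < needed:
--         return 'IMPOSSIBLE'
--     # head: Horner accumulation of u = st - 1 over d = 1 .. min(C,K)-1
--     u = 0
--     for d in range(1, min(C, K)):
--         u = u * K + d
--     st = u + 1
--     # tail: once the added column is clamped, every step multiplies by K: one pow
--     base = K if K > 1 else 1
--     if C > base:
--         st *= K ** (C - base)
--     # render the needed consecutive indices by direct concatenation
--     out = str(st)
--     for j in range(1, needed):
--         out = out + ' ' + str(st + j)
--     return out
-- ===== Notes on version B (the rewrite author's own statement) =====
-- stated objective: alternative
-- what changed: A's single O(C) loop over a (pat,char,st) triple is replaced by a short Horner loop on u = st-1 up to min(C,K), one closed-form fast power K**(C-max(K,1)) for the clamped tail, and output built by direct string concatenation instead of join(map(str, range(...))).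
import Mathlib
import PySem

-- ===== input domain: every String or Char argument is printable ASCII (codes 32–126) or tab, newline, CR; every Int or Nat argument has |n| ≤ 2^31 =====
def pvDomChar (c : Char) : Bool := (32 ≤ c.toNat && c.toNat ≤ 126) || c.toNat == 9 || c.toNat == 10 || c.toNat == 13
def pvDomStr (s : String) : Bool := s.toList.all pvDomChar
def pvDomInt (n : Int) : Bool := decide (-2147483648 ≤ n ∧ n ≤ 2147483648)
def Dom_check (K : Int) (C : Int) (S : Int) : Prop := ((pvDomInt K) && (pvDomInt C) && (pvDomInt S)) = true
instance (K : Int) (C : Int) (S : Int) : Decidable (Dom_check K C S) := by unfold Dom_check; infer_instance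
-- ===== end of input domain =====

-- B replaces A's full O(C) three-variable recurrence by a short Horner loop on u = st - 1
-- up to min(C,K), one closed-form power K^(C - max(K,1)) for the clamped tail, and renders
-- the output by direct string concatenation instead of join(map(str, range(...))).

-- ===== PORT A =====
def check (K : Int) (C : Int) (S : Int) : String :=
  let needed := max (K - C + 1) 1
  if S < needed then "IMPOSSIBLE"
  else
    -- pat = 0; char = 1; st = pat + char; for i in range(2, C+1): ...
    let stt :=
      ((PySem.List.pyRange 2 (C + 1) 1).foldl
        (fun (acc : Int × Int × Int) _i =>
          let pat := (acc.2.2 - 1) * K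
          let char := acc.2.1 + 1
          let char := if char > K then K else char
          (pat, char, pat + char))
        (0, 1, 1)).2.2
    PySem.Str.join " " ((PySem.List.pyRange stt (stt + needed) 1).map PySem.Int.toStr)

-- ===== PORT B =====
def check_alt (K : Int) (C : Int) (S : Int) : String :=
  let needed := if K - C + 1 > 1 then K - C + 1 else 1
  if S < needed then "IMPOSSIBLE"
  else
    -- u = 0; for d in range(1, min(C, K)): u = u*K + d; st = u + 1
    let u := (PySem.List.pyRange 1 (min C K) 1).foldl (fun u d => u * K + d) 0
    let st := u + 1
    -- Python's st *= K ** (C - base): the exponent is positive when this fires, so Nat pow is exact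
    let base := if K > 1 then K else 1
    let st := if C > base then st * K ^ (C - base).toNat else st
    -- out = str(st); for j in range(1, needed): out = out + ' ' + str(st + j)
    (PySem.List.pyRange 1 needed 1).foldl
      (fun out j => out ++ " " ++ PySem.Int.toStr (st + j)) (PySem.Int.toStr st)

-- ===== PRECONDITION & SPEC =====
def Spec_check (K : Int) (C : Int) (S : Int) (out : String) : Prop := out = check_alt K C S
instance (K : Int) (C : Int) (S : Int) (out : String) : Decidable (Spec_check K C S out) := by unfold Spec_check; infer_instance

-- ===== CLAIM (what is proved, stated in full; the proofs are below) =====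
def Claim_equal_check : Prop := ∀ (K : Int) (C : Int) (S : Int), Dom_check K C S → Spec_check K C S (check K C S)

-- ===== LEMMAS AND PROOFS =====

-- Canonical value of A's st after n iterations starting from i = 2:
-- char after processing index i equals min i K (for i >= 2).
def pvS (K : Int) : Nat → Int
  | 0 => 1
  | n + 1 => (pvS K n - 1) * K + min ((n : Int) + 2) K

def pvAstep (K : Int) (acc : Int × Int × Int) (_i : Int) : Int × Int × Int :=
  let pat := (acc.2.2 - 1) * K
  let char := acc.2.1 + 1
  let char := if char > K then K else char
  (pat, char, pat + char)

-- A's fold state after consuming the indices 2, 3, …, n+2 (at least one iteration).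
lemma pvA_state (K : Int) (n : Nat) :
    ((List.range (n + 1)).map (fun k : Nat => (2 : Int) + (k : Int))).foldl (pvAstep K) (0, 1, 1)
      = (pvS K (n + 1) - min ((n : Int) + 2) K, min ((n : Int) + 2) K, pvS K (n + 1)) := by
  induction n with
  | zero =>
      simp [pvAstep, pvS, min_def]
      split_ifs <;> omega
  | succ n ih =>
      rw [List.range_succ, List.map_append, List.foldl_append, ih]
      have hchar : (if min ((n : Int) + 2) K + 1 > K then K else min ((n : Int) + 2) K + 1)
          = min ((n : Int) + 3) K := by
        rcases le_or_gt K ((n : Int) + 2) with h | h <;> simp [min_def] <;> omega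
      simp only [List.map_cons, List.map_nil, List.foldl_cons, List.foldl_nil, pvAstep, pvS]
      push_cast
      rw [hchar]
      refine Prod.ext ?_ (Prod.ext ?_ ?_) <;> simp <;> ring_nf

-- The st component of A's fold, for any number of iterations.
lemma pvA_st (K : Int) (n : Nat) :
    (((List.range n).map (fun k : Nat => (2 : Int) + (k : Int))).foldl (pvAstep K) (0, 1, 1)).2.2
      = pvS K n := by
  cases n with
  | zero => simp [pvS]
  | succ n => rw [pvA_state]

-- Once the index reaches K, each step multiplies by K.
lemma pvS_pow (K : Int) (n : Nat) (h : K ≤ (n : Int) + 1) (m : Nat) :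
    pvS K (n + m) = pvS K n * K ^ m := by
  induction m with
  | zero => simp
  | succ m ih =>
      have hmin : min ((((n + m : Nat)) : Int) + 2) K = K := by
        push_cast; omega
      calc pvS K (n + (m + 1)) = (pvS K (n + m) - 1) * K + min ((((n + m : Nat)) : Int) + 2) K := rfl
        _ = pvS K (n + m) * K := by rw [hmin]; ring
        _ = pvS K n * K ^ (m + 1) := by rw [ih]; ring

-- B's Horner loop on u = st - 1 (indices there are < K, so the clamp is inactive).
lemma pvB_horner (K : Int) (n : Nat) (h : (n : Int) + 1 ≤ K) :
    ((List.range n).map (fun k : Nat => (1 : Int) + (k : Int))).foldl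
        (fun u d => u * K + d) 0
      = pvS K n - 1 := by
  induction n with
  | zero => simp [pvS]
  | succ n ih =>
      have h' : (n : Int) + 1 ≤ K := by push_cast at h ⊢; omega
      rw [List.range_succ, List.map_append, List.foldl_append, ih h']
      have hmin : min ((n : Int) + 2) K = (n : Int) + 2 := by push_cast at h; omega
      simp [pvS, hmin]
      ring

-- The two computed st values agree.
lemma pv_st_eq (K C : Int) :
    (let st := (PySem.List.pyRange 1 (min C K) 1).foldl (fun u d => u * K + d) 0 + 1
     let base := if K > 1 then K else 1
     if C > base then st * K ^ (C - base).toNat else st)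
      = ((PySem.List.pyRange 2 (C + 1) 1).foldl (pvAstep K) (0, 1, 1)).2.2 := by
  rw [PySem.List.pyRange_one, PySem.List.pyRange_one]
  have h2 : (C + 1 - 2 : Int) = C - 1 := by ring
  rw [h2, pvA_st]
  have hbase : (if K > 1 then K else 1) = max K 1 := by
    split_ifs <;> omega
  rw [hbase]
  by_cases hC : C > max K 1
  · simp only [if_pos hC]
    by_cases hK : K ≥ 2
    · have hmin : min C K = K := by omega
      rw [hmin, pvB_horner K (K - 1).toNat (by omega)]
      have hsplit : (C - 1).toNat = (K - 1).toNat + (C - max K 1).toNat := by omega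
      rw [hsplit, pvS_pow K (K - 1).toNat (by omega)]
      ring
    · have hmin : (min C K - 1).toNat = 0 := by omega
      rw [hmin]
      have hsplit : (C - 1).toNat = 0 + (C - max K 1).toNat := by omega
      rw [hsplit, pvS_pow K 0 (by push_cast; omega)]
      simp [pvS]
  · simp only [if_neg hC]
    have : (min C K - 1).toNat = (C - 1).toNat := by omega
    rw [this]
    by_cases hC1 : C ≤ 1
    · have h0 : (C - 1).toNat = 0 := by omega
      rw [h0]; simp [pvS]
    · have hCK : ((C - 1).toNat : Int) + 1 ≤ K := by omega
      rw [pvB_horner K (C - 1).toNat hCK]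
      ring

-- join over (a ++ sep ++ b) :: t flattens to join over a :: b :: t.
lemma pv_join_cons_append (sep a b : String) (t : List String) :
    PySem.Str.join sep ((a ++ sep ++ b) :: t) = PySem.Str.join sep (a :: b :: t) := by
  cases t with
  | nil =>
      simp [PySem.Str.join, PySem.Chars.join, List.intercalate]
  | cons c t' =>
      simp [PySem.Str.join, PySem.Chars.join, List.intercalate]

-- a foldl accumulating 'out ++ sep ++ x' is a join over init :: l.
lemma pv_foldl_concat_join (sep : String) (l : List String) :
    ∀ init : String,
      l.foldl (fun out x => out ++ sep ++ x) init = PySem.Str.join sep (init :: l) := by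
  induction l with
  | nil =>
      intro init
      simp [PySem.Str.join, PySem.Chars.join, List.intercalate]
  | cons x t ih =>
      intro init
      simp only [List.foldl_cons]
      rw [ih (init ++ sep ++ x), pv_join_cons_append]

-- B's rendering foldl equals A's join over the range, for needed = n + 1 ≥ 1 elements.
lemma pv_render_eq (st : Int) (n : Nat) :
    ((List.range n).map (fun k : Nat => (1 : Int) + (k : Int))).foldl
        (fun out j => out ++ " " ++ PySem.Int.toStr (st + j)) (PySem.Int.toStr st)
      = PySem.Str.join " " (((List.range (n + 1)).map (fun k : Nat => st + (k : Int))).map PySem.Int.toStr) := by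
  rw [List.foldl_map]
  have hfold :
      (List.range n).foldl (fun out (k : Nat) => out ++ " " ++ PySem.Int.toStr (st + (1 + (k : Int)))) (PySem.Int.toStr st)
        = ((List.range n).map (fun k : Nat => PySem.Int.toStr (st + (1 + (k : Int))))).foldl
            (fun out x => out ++ " " ++ x) (PySem.Int.toStr st) := by
      rw [List.foldl_map]
  rw [hfold, pv_foldl_concat_join]
  congr 1
  rw [List.range_succ_eq_map]
  simp only [List.map_cons, List.map_map]
  congr 1
  · simp
  · apply List.map_congr_left
    intro k _
    simp only [Function.comp]
    congr 1
    push_cast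
    ring

-- ===== VERDICT (by name: the statement is the Claim_ definition above) =====
theorem check_spec : Claim_equal_check := by
  intro K C S _
  unfold Spec_check check check_alt
  have hneed : (if K - C + 1 > 1 then K - C + 1 else 1) = max (K - C + 1) 1 := by
    split_ifs <;> omega
  rw [hneed]
  by_cases hS : S < max (K - C + 1) 1
  · simp [hS]
  · simp only [if_neg hS]
    rw [show (fun (acc : Int × Int × Int) (_i : Int) =>
          let pat := (acc.2.2 - 1) * K
          let char := acc.2.1 + 1
          let char := if char > K then K else char
          (pat, char, pat + char)) = pvAstep K from rfl]
    rw [← pv_st_eq K C]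
    set st := (let st := (PySem.List.pyRange 1 (min C K) 1).foldl (fun u d => u * K + d) 0 + 1
               let base := if K > 1 then K else 1
               if C > base then st * K ^ (C - base).toNat else st) with hst
    have hpos : (1 : Int) ≤ max (K - C + 1) 1 := le_max_right _ _
    have hn : max (K - C + 1) 1 = ((max (K - C + 1) 1 - 1).toNat : Int) + 1 := by omega
    rw [PySem.List.pyRange_one, PySem.List.pyRange_one]
    have h1 : (max (K - C + 1) 1 - 1 : Int) = ((max (K - C + 1) 1 - 1).toNat : Int) := by omega
    have h2 : (st + max (K - C + 1) 1 - st : Int).toNat = (max (K - C + 1) 1 - 1).toNat + 1 := by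
      omega
    rw [h1, h2, Int.toNat_natCast]
    exact (pv_render_eq st ((max (K - C + 1) 1 - 1).toNat)).symm
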